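-- pv_equiv track=rewrite | github.com/kriolog/qfrost | scripts/qfrost_plot_2d.py | polygons
-- ===== SOURCE A (Python) =====
-- def polygons(points, startPoints):
--     result = []
--     curPoly = []
--     for i in range(len(points)):
--         if i in startPoints and curPoly != []:
--             result.append(curPoly)
--             curPoly = []
--         curPoly.append(points[i])
--     if curPoly != []:
--         result.append(curPoly)
--     return result
-- ===== SOURCE B (Python) =====
-- def polygons(points, startPoints):
--     if not points:
--         return []
--     cuts = [i for i in range(1, len(points)) if i in startPoints]
--     bounds = [0] + cuts + [len(points)]
--     return [points[a:b] for a, b in zip(bounds, bounds[1:])]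
-- ===== Notes on version B (the rewrite author's own statement) =====
-- stated objective: simpler
-- what changed: Replaces A's interleaved accumulate-and-flush loop with two declarative passes: collect the cut indices first, then slice points between consecutive boundaries.
import Mathlib
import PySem

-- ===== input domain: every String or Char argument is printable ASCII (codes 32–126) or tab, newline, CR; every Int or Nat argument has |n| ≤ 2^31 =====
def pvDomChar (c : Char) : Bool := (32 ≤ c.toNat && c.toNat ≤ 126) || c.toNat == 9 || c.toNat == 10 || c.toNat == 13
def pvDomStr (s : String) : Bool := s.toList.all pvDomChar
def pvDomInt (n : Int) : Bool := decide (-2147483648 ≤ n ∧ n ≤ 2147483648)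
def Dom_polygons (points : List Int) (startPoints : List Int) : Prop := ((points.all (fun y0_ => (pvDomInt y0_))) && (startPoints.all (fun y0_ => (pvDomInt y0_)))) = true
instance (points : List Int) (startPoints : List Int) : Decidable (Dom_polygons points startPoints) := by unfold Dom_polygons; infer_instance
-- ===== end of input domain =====

-- B builds the list of cut indices first and slices points between consecutive boundaries,
-- instead of A's interleaved accumulate-and-flush loop; objective: simpler (no speed claim).

-- ===== PORT A =====
-- A's loop body: flush curPoly on a cut (i in startPoints and curPoly nonempty), then append points[i].
def pvStepA (points : List Int) (startPoints : List Int)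
    (st : List (List Int) × List Int) (i : Nat) : List (List Int) × List Int :=
  let st := if startPoints.contains (Int.ofNat i) = true ∧ st.2 ≠ [] then (st.1 ++ [st.2], ([] : List Int)) else st
  (st.1, st.2 ++ [points.getD i 0])

def polygons (points : List Int) (startPoints : List Int) : List (List Int) :=
  let st := (List.range points.length).foldl (pvStepA points startPoints) ([], [])
  if st.2 ≠ [] then st.1 ++ [st.2] else st.1

-- ===== PORT B =====
-- Source B: guard empty input, cuts = [i in 1..len-1 with i in startPoints], bounds = [0]+cuts+[len],
-- slice points[a:b] for consecutive boundary pairs; drop/take is exact here since 0 ≤ a ≤ b ≤ len.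
def polygons_alt (points : List Int) (startPoints : List Int) : List (List Int) :=
  if points = [] then []
  else
    let cuts := (List.range' 1 (points.length - 1)).filter (fun i => startPoints.contains (Int.ofNat i))
    let bounds := 0 :: (cuts ++ [points.length])
    (bounds.zip bounds.tail).map (fun ab => (points.drop ab.1).take (ab.2 - ab.1))

-- ===== PRECONDITION & SPEC =====
def Spec_polygons (points : List Int) (startPoints : List Int) (out : List (List Int)) : Prop := out = polygons_alt points startPoints
instance (points : List Int) (startPoints : List Int) (out : List (List Int)) : Decidable (Spec_polygons points startPoints out) := by unfold Spec_polygons; infer_instance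

-- ===== CLAIM (what is proved, stated in full; the proofs are below) =====
def Claim_equal_polygons : Prop := ∀ (points : List Int) (startPoints : List Int), Dom_polygons points startPoints → Spec_polygons points startPoints (polygons points startPoints)

-- ===== LEMMAS AND PROOFS =====

-- the cut indices among 1..n-1 (B's `cuts` list, parametrised by the prefix length n)
def pvCuts (sp : List Int) (n : Nat) : List Nat :=
  (List.range' 1 (n - 1)).filter (fun i => sp.contains (Int.ofNat i))

def pvSlice (points : List Int) (a b : Nat) : List Int := (points.drop a).take (b - a)

def pvPairsMap (points : List Int) (bs : List Nat) : List (List Int) :=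
  (bs.zip bs.tail).map (fun ab => pvSlice points ab.1 ab.2)

lemma pvCuts_succ (sp : List Int) (n : Nat) (hn : 1 ≤ n) :
    pvCuts sp (n + 1) = pvCuts sp n ++ if sp.contains (Int.ofNat n) = true then [n] else [] := by
  unfold pvCuts
  have h : n + 1 - 1 = (n - 1) + 1 := by omega
  rw [h, List.range'_1_concat, List.filter_append]
  have h2 : 1 + (n - 1) = n := by omega
  rw [h2]
  congr 1
  by_cases hc : ((n : ℤ) ∈ sp) <;> simp [hc]

lemma pvCuts_mem_lt (sp : List Int) (n : Nat) {x : Nat} (hx : x ∈ pvCuts sp n) : 1 ≤ x ∧ x < n := by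
  unfold pvCuts at hx
  have := List.mem_range'.mp (List.mem_of_mem_filter hx)
  omega

lemma pvLast_lt (sp : List Int) (n : Nat) (hn : 1 ≤ n) :
    (0 :: pvCuts sp n).getLastD 0 < n := by
  rw [List.getLastD_cons]
  cases h : pvCuts sp n with
  | nil => simpa using hn
  | cons y ys =>
    have hmem : (y :: ys).getLastD 0 ∈ pvCuts sp n := by
      rw [h, List.getLastD_cons]
      exact List.getLastD_mem_cons
    exact (pvCuts_mem_lt sp n hmem).2

lemma pvSlice_extend (points : List Int) (a n : Nat) (ha : a ≤ n) (hn : n < points.length) :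
    pvSlice points a n ++ [points.getD n 0] = pvSlice points a (n + 1) := by
  unfold pvSlice
  have h1 : n + 1 - a = (n - a) + 1 := by omega
  rw [h1, List.take_add_one]
  congr 1
  have h2 : (points.drop a)[n - a]? = points[n]? := by
    rw [List.getElem?_drop]
    congr 1
    omega
  rw [h2, List.getElem?_eq_getElem hn]
  simp [List.getD_eq_getElem?_getD, List.getElem?_eq_getElem hn]

lemma pvSlice_ne_nil (points : List Int) (a n : Nat) (ha : a < n) (hn : n ≤ points.length) :
    pvSlice points a n ≠ [] := by
  unfold pvSlice
  intro h
  have := congrArg List.length h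
  simp at this
  omega

lemma pvZip_concat {bs : List Nat} (m : Nat) (h : bs ≠ []) :
    (bs ++ [m]).zip (bs ++ [m]).tail = bs.zip bs.tail ++ [(bs.getLastD 0, m)] := by
  induction bs with
  | nil => exact absurd rfl h
  | cons a t ih =>
    cases t with
    | nil => simp
    | cons b t' =>
      have := ih (by simp)
      simp only [List.cons_append, List.tail_cons, List.zip_cons_cons] at this ⊢
      rw [this]
      simp

lemma pvPairsMap_concat (points : List Int) (bs : List Nat) (m : Nat) (h : bs ≠ []) :
    pvPairsMap points (bs ++ [m]) = pvPairsMap points bs ++ [pvSlice points (bs.getLastD 0) m] := by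
  unfold pvPairsMap
  rw [pvZip_concat m h, List.map_append]
  rfl

-- main invariant of A's loop: after the first n iterations, result holds the slices between
-- the boundaries 0 :: cuts, and curPoly is the slice from the last boundary to n
lemma polygons_invariant (points sp : List Int) (n : Nat) (hn : n ≤ points.length) :
    (List.range n).foldl (pvStepA points sp) ([], []) =
    (pvPairsMap points (0 :: pvCuts sp n),
     pvSlice points ((0 :: pvCuts sp n).getLastD 0) n) := by
  induction n with
  | zero => simp [pvCuts, pvPairsMap, pvSlice]
  | succ n ih =>
    have hn' : n ≤ points.length := by omega
    rw [List.range_succ, List.foldl_append, ih hn', List.foldl_cons, List.foldl_nil]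
    simp only [pvStepA]
    by_cases h1 : 1 ≤ n
    · have hlast := pvLast_lt sp n h1
      have hne : pvSlice points ((0 :: pvCuts sp n).getLastD 0) n ≠ [] :=
        pvSlice_ne_nil points _ n hlast hn'
      by_cases hc : sp.contains (Int.ofNat n) = true
      · rw [if_pos ⟨hc, hne⟩, pvCuts_succ sp n h1, if_pos hc]
        have hcons : (0 : Nat) :: (pvCuts sp n ++ [n]) = (0 :: pvCuts sp n) ++ [n] := by simp
        rw [hcons, pvPairsMap_concat points _ n (by simp), List.getLastD_concat]
        refine Prod.ext rfl ?_
        rw [← pvSlice_extend points n n (le_refl n) (by omega)]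
        simp [pvSlice]
      · rw [if_neg (fun hcontra => hc hcontra.1), pvCuts_succ sp n h1, if_neg hc, List.append_nil]
        refine Prod.ext rfl ?_
        exact pvSlice_extend points _ n (by omega) (by omega)
    · have hn0 : n = 0 := by omega
      subst hn0
      have e1 : pvPairsMap points (0 :: pvCuts sp 0) = [] := rfl
      have e2 : pvSlice points ((0 :: pvCuts sp 0).getLastD 0) 0 = [] := rfl
      rw [e1, e2, if_neg (by simp)]
      have e3 : pvCuts sp 1 = [] := rfl
      rw [e3]
      refine Prod.ext rfl ?_
      simp [pvSlice]
      cases points with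
      | nil => simp at hn
      | cons p ps => simp [List.take_add_one]

-- ===== VERDICT (by name: the statement is the Claim_ definition above) =====
theorem polygons_spec : Claim_equal_polygons := by
  intro points sp _
  unfold Spec_polygons polygons polygons_alt
  by_cases hnil : points = []
  · subst hnil; simp
  · have hlen : 1 ≤ points.length := by
      cases points with
      | nil => exact absurd rfl hnil
      | cons p ps => simp
    simp only [if_neg hnil]
    rw [polygons_invariant points sp points.length (le_refl _)]
    have hlast := pvLast_lt sp points.length hlen
    have hne : pvSlice points ((0 :: pvCuts sp points.length).getLastD 0) points.length ≠ [] :=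
      pvSlice_ne_nil points _ _ hlast (le_refl _)
    rw [if_pos hne]
    have hcons : (0 : Nat) :: ((pvCuts sp points.length) ++ [points.length]) =
        (0 :: pvCuts sp points.length) ++ [points.length] := by simp
    have := pvPairsMap_concat points (0 :: pvCuts sp points.length) points.length (by simp)
    rw [← hcons] at this
    exact this.symm
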